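-- pv_equiv track=rewrite | github.com/Swayam595/LeetCode-Solutions-Python | 1093_Statistics_from_a_Large_Sample.py | median_index
-- ===== SOURCE A (Python) =====
-- def median_index(mid, count):
--     left_over = 0
--     index = -1
--
--     while mid != 0:
--         index += 1
--         if mid - count[index] >= 0:
--             mid -= count[index]
--         else:
--             mid = 0
--             left_over = count[index] - mid
--
--     return [index, left_over]
-- ===== SOURCE B (Python) =====
-- from itertools import accumulate
-- from bisect import bisect_left
--
--
-- def median_index(mid, count):
--     if mid == 0:
--         return [-1, 0]
--     acc = list(accumulate(count))
--     j = bisect_left(acc, mid)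
--     if acc[j] == mid:
--         return [j, 0]
--     return [j, count[j]]
-- ===== Notes on version B (the rewrite author's own statement) =====
-- stated objective: alternative
-- what changed: B builds the prefix sums once with itertools.accumulate and locates the stop position by binary search (bisect_left), instead of A's while loop that destructively subtracts each count from mid while tracking index and left_over.
-- outside the precondition, e.g. on median_index(3, [5, -5, 5]): A returns [0, 5], B returns [2, 5]; on median_index(1, [2, -5, 1]): A returns [0, 2], B raises IndexError
import Mathlib
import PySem

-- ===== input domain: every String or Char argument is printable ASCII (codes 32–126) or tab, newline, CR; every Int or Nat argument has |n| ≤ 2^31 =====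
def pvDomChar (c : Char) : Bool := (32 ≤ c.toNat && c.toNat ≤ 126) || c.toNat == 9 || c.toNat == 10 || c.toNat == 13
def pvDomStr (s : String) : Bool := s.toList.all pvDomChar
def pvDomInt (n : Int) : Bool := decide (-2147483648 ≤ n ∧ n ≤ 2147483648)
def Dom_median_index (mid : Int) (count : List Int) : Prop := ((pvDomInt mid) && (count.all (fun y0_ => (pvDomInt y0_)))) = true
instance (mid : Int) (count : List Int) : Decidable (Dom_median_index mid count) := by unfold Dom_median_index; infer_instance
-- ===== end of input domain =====

-- B replaces A's destructive while loop by prefix sums (itertools.accumulate) plus a binary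
-- search (bisect_left); objective: alternative (a different algorithm at the same O(n) cost).

-- ===== PORT A =====
-- A's while loop: state (mid, index, left_over); fuel merely bounds the iterations and
-- count.length + 2 suffices on every input where the Python loop terminates
def medGoA (count : List Int) (mid index left_over : Int) : Nat → List Int
  | 0 => [0, 0]
  | fuel + 1 =>
    if mid = 0 then [index, left_over]
    else
      match PySem.List.pyGet? count (index + 1) with
      | none => [0, 0]      -- IndexError (excluded by Pre_)
      | some c =>
        if mid - c ≥ 0 then medGoA count (mid - c) (index + 1) left_over fuel
        else medGoA count 0 (index + 1) c fuel

def median_index (mid : Int) (count : List Int) : List Int :=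
  medGoA count mid (-1) 0 (count.length + 2)

-- ===== PORT B =====
-- itertools.accumulate(count)
def pyAccumulate (s : Int) : List Int → List Int
  | [] => []
  | x :: xs => (s + x) :: pyAccumulate (s + x) xs

-- bisect.bisect_left(a, x) = blLoop a x 0 a.length
def blLoop (a : List Int) (x : Int) (lo hi : Nat) : Nat :=
  if _h : lo < hi then
    let m := (lo + hi) / 2
    if a.getD m 0 < x then blLoop a x (m + 1) hi else blLoop a x lo m
  else lo
termination_by hi - lo
decreasing_by all_goals omega

def median_index_alt (mid : Int) (count : List Int) : List Int :=
  if mid = 0 then [-1, 0]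
  else
    let acc := pyAccumulate 0 count
    let j := blLoop acc mid 0 acc.length
    match PySem.List.pyGet? acc (j : Int) with   -- acc[j]: IndexError when j = len (excluded by Pre_)
    | none => [0, 0]
    | some v =>
      if v = mid then [(j : Int), 0]
      else [(j : Int), PySem.List.pyGetD count (j : Int) 0]

-- ===== PRECONDITION & SPEC =====
-- Pre_ restricts to the function's natural domain: the counts must be nonnegative (a list with
-- negative counts is outside the 'counts of a sample' purpose; A returns accidental values there
-- that B's monotone binary search does not reproduce), and excludes the inputs where A raises
-- IndexError, which happens exactly when mid ≠ 0 and (count is empty or mid > sum(count)).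
def Pre_median_index (mid : Int) (count : List Int) : Prop :=
  (∀ c ∈ count, 0 ≤ c) ∧ (mid = 0 ∨ (count ≠ [] ∧ mid ≤ count.sum))
instance (mid : Int) (count : List Int) : Decidable (Pre_median_index mid count) := by
  unfold Pre_median_index; infer_instance

def pvWitness_median_index : Int × List Int := (3, [1, 2, 3])

def Spec_median_index (mid : Int) (count : List Int) (out : List Int) : Prop := out = median_index_alt mid count
instance (mid : Int) (count : List Int) (out : List Int) : Decidable (Spec_median_index mid count out) := by unfold Spec_median_index; infer_instance

-- ===== CLAIM (what is proved, stated in full; the proofs are below) =====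
def Claim_equal_median_index : Prop := ∀ (mid : Int) (count : List Int), Dom_median_index mid count → Pre_median_index mid count → Spec_median_index mid count (median_index mid count)

-- ===== LEMMAS AND PROOFS =====

-- prefix sums: pvP count k = sum of the first k counts
def pvP (count : List Int) (k : Nat) : Int := (count.take k).sum

theorem pvP_succ (count : List Int) (k : Nat) (hk : k < count.length) :
    pvP count (k + 1) = pvP count k + count.getD k 0 := by
  have h1 : List.take k count ++ [count[k]] = List.take (k+1) count := by
    simpa [List.concat_eq_append] using (List.take_concat_get (l := count) (i := k) (h := hk))
  unfold pvP
  rw [← h1, List.sum_append, List.getD_eq_getElem count 0 hk]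
  simp

theorem pvP_mono (count : List Int) (hnn : ∀ c ∈ count, 0 ≤ c)
    {j k : Nat} (h : j ≤ k) : pvP count j ≤ pvP count k := by
  induction k with
  | zero => have : j = 0 := by omega
            simp [this]
  | succ k ih =>
    rcases Nat.lt_or_ge j (k+1) with h'|h'
    · have hjk : j ≤ k := by omega
      refine le_trans (ih hjk) ?_
      by_cases hk : k < count.length
      · rw [pvP_succ count k hk]
        have h0 : 0 ≤ count.getD k 0 := by
          rw [List.getD_eq_getElem count 0 hk]
          exact hnn _ (List.getElem_mem hk)
        omega
      · have : count.take (k+1) = count.take k := by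
          rw [List.take_of_length_le (by omega), List.take_of_length_le (by omega)]
        simp [pvP, this]
    · have : j = k+1 := by omega
      simp [this]

theorem pyAccumulate_length (s : Int) (xs : List Int) :
    (pyAccumulate s xs).length = xs.length := by
  induction xs generalizing s with
  | nil => rfl
  | cons x xs ih => simp [pyAccumulate, ih]

theorem pyAccumulate_getD (xs : List Int) (s : Int) (j : Nat) (hj : j < xs.length) :
    (pyAccumulate s xs).getD j 0 = s + (xs.take (j + 1)).sum := by
  induction xs generalizing s j with
  | nil => simp at hj
  | cons x xs ih =>
    cases j with
    | zero => simp [pyAccumulate]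
    | succ j =>
      simp only [pyAccumulate, List.getD_cons_succ]
      rw [ih (s + x) j (by simpa using hj)]
      simp [List.take_succ_cons]
      ring

-- bisect_left on a nondecreasing list: everything left of the result is < x,
-- everything from the result on (within the list) is ≥ x
theorem blLoop_spec (a : List Int) (x : Int)
    (hmono : ∀ i j : Nat, i ≤ j → j < a.length → a.getD i 0 ≤ a.getD j 0) :
    ∀ lo hi : Nat, lo ≤ hi → hi ≤ a.length →
    (∀ k < lo, a.getD k 0 < x) → (∀ k, hi ≤ k → k < a.length → x ≤ a.getD k 0) →
    (∀ k < blLoop a x lo hi, a.getD k 0 < x) ∧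
    (∀ k, blLoop a x lo hi ≤ k → k < a.length → x ≤ a.getD k 0) ∧
    lo ≤ blLoop a x lo hi ∧ blLoop a x lo hi ≤ hi := by
  intro lo hi
  induction hn : hi - lo using Nat.strong_induction_on generalizing lo hi with
  | _ n ih =>
  intro hlh hha hlow hhigh
  rw [blLoop]
  by_cases h : lo < hi
  · simp only [h, dif_pos]
    set m := (lo + hi) / 2 with hm
    have hmlo : lo ≤ m := by omega
    have hmhi : m < hi := by omega
    by_cases hc : a.getD m 0 < x
    · simp only [← hm, if_pos hc]
      have hlow' : ∀ k < m + 1, a.getD k 0 < x := by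
        intro k hk
        exact lt_of_le_of_lt (hmono k m (by omega) (by omega)) hc
      have := ih (hi - (m+1)) (by omega) (m+1) hi rfl (by omega) hha hlow' hhigh
      exact ⟨this.1, this.2.1, by omega, this.2.2.2⟩
    · simp only [← hm, if_neg hc]
      push_neg at hc
      have hhigh' : ∀ k, m ≤ k → k < a.length → x ≤ a.getD k 0 := by
        intro k hk hk2
        exact le_trans hc (hmono m k hk hk2)
      have := ih (m - lo) (by omega) lo m rfl (by omega) (by omega) hlow hhigh'
      refine ⟨this.1, fun k hk hk2 => ?_, this.2.2.1, by omega⟩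
      rcases Nat.lt_or_ge k m with h'|h'
      · exact this.2.1 k hk hk2
      · exact hhigh' k h' hk2
  · rw [dif_neg h]
    have : lo = hi := by omega
    exact ⟨hlow, fun k hk hk2 => hhigh k (by omega) hk2, le_refl _, hlh⟩

-- A's loop, entered at index k-1 with mid diminished by the first k counts, stops at J,
-- the first position whose inclusive prefix sum reaches mid
theorem medGoA_spec (count : List Int) (mid : Int) (J : Nat)
    (hnn : ∀ c ∈ count, 0 ≤ c)
    (hJn : J < count.length)
    (hlt : ∀ k < J, pvP count (k + 1) < mid)
    (hge : mid ≤ pvP count (J + 1))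
    (hmid : mid ≠ 0) :
    ∀ fuel k : Nat, k ≤ J → J - k + 2 ≤ fuel →
    medGoA count (mid - pvP count k) ((k : Int) - 1) 0 fuel
      = if pvP count (J + 1) = mid then [(J : Int), 0] else [(J : Int), count.getD J 0] := by
  intro fuel
  induction fuel with
  | zero => intro k _ h2; omega
  | succ fuel ih =>
    intro k hkJ hfuel
    have hkn : k < count.length := by omega
    have hne : mid - pvP count k ≠ 0 := by
      cases Nat.eq_zero_or_pos k with
      | inl h0 => subst h0; simpa [pvP] using hmid
      | inr hpos =>
        have : pvP count k < mid := by
          have := hlt (k - 1) (by omega)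
          simpa [Nat.sub_add_cancel hpos] using this
        omega
    have hidx : ((k : Int) - 1) + 1 = (k : Int) := by ring
    have hget : PySem.List.pyGet? count ((k : Int) - 1 + 1) = some (count.getD k 0) := by
      rw [hidx, PySem.List.pyGet?_natCast, List.getElem?_eq_getElem hkn,
          List.getD_eq_getElem count 0 hkn]
    have hPk : pvP count (k + 1) = pvP count k + count.getD k 0 := pvP_succ count k hkn
    rw [medGoA, if_neg hne, hget]
    dsimp only
    rcases Nat.lt_or_ge k J with hlt'|hge'
    · -- strictly before the stop: the if-branch continues the loop
      have hc : mid - pvP count k - count.getD k 0 ≥ 0 := by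
        have := hlt k hlt'; omega
      rw [if_pos hc]
      have : mid - pvP count k - count.getD k 0 = mid - pvP count (k + 1) := by omega
      rw [this, hidx]
      have : (k : Int) = ((k + 1 : Nat) : Int) - 1 := by push_cast; ring
      rw [this]
      exact ih (k + 1) (by omega) (by omega)
    · -- k = J: the loop stops, exactly (mid becomes 0) or by overshoot (else branch)
      have hkJ' : k = J := by omega
      subst hkJ'
      by_cases hx : pvP count (k + 1) = mid
      · have hc : mid - pvP count k - count.getD k 0 ≥ 0 := by omega
        rw [if_pos hc]
        have h0 : mid - pvP count k - count.getD k 0 = 0 := by omega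
        rw [h0, hidx]
        obtain ⟨f, rfl⟩ : ∃ f, fuel = f + 1 := ⟨fuel - 1, by omega⟩
        rw [medGoA, if_pos rfl, if_pos hx]
      · have hc : ¬ (mid - pvP count k - count.getD k 0 ≥ 0) := by omega
        rw [if_neg hc, hidx]
        obtain ⟨f, rfl⟩ : ∃ f, fuel = f + 1 := ⟨fuel - 1, by omega⟩
        rw [medGoA, if_pos rfl, if_neg hx]

-- ===== VERDICT (by name: the statement is the Claim_ definition above) =====
theorem median_index_spec : Claim_equal_median_index := by
  intro mid count _hdom hpre
  obtain ⟨hnn, hcase⟩ := hpre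
  unfold Spec_median_index median_index median_index_alt
  by_cases hm : mid = 0
  · subst hm
    rw [if_pos rfl, medGoA, if_pos rfl]
  · rw [if_neg hm]
    rcases hcase with h0 | ⟨hne, hsum⟩
    · exact absurd h0 hm
    have hn1 : 0 < count.length := List.length_pos_of_ne_nil hne
    set acc := pyAccumulate 0 count with hacc
    have hlen : acc.length = count.length := pyAccumulate_length 0 count
    have haccget : ∀ j, j < count.length → acc.getD j 0 = pvP count (j + 1) := by
      intro j hj
      rw [hacc, pyAccumulate_getD count 0 j hj]
      simp [pvP]
    have hmono : ∀ i j : Nat, i ≤ j → j < acc.length → acc.getD i 0 ≤ acc.getD j 0 := by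
      intro i j hij hj
      rw [haccget i (by omega), haccget j (by omega)]
      exact pvP_mono count hnn (by omega)
    have hspec := blLoop_spec acc mid hmono 0 acc.length (by omega) (le_refl _)
      (by intro k hk; omega) (by intro k hk hk2; omega)
    set r := blLoop acc mid 0 acc.length with hr
    have hlast : mid ≤ acc.getD (count.length - 1) 0 := by
      rw [haccget _ (by omega)]
      have : pvP count (count.length - 1 + 1) = count.sum := by
        rw [Nat.sub_add_cancel hn1]
        simp [pvP]
      omega
    have hrlt : r < count.length := by
      by_contra hge'
      have := hspec.1 (count.length - 1) (by omega)
      omega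
    have hJge : mid ≤ acc.getD r 0 := hspec.2.1 r (le_refl r) (by omega)
    have hA := medGoA_spec count mid r hnn hrlt
      (fun k hk => by rw [← haccget k (by omega)]; exact hspec.1 k hk)
      (by rw [← haccget r hrlt]; exact hJge) hm
      (count.length + 2) 0 (by omega) (by omega)
    have hA' : medGoA count mid (-1) 0 (count.length + 2)
        = if pvP count (r + 1) = mid then [(r : Int), 0] else [(r : Int), count.getD r 0] := by
      simpa [pvP] using hA
    have hbget : PySem.List.pyGet? acc ((r : Nat) : Int) = some (acc.getD r 0) := by
      rw [PySem.List.pyGet?_natCast, List.getElem?_eq_getElem (by omega : r < acc.length),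
          List.getD_eq_getElem acc 0 (by omega : r < acc.length)]
    simp only [← hacc, ← hr, hbget, PySem.List.pyGetD_natCast]
    rw [hA', haccget r hrlt]
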